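-- pv_equiv track=rewrite | github.com/MayHyeyeonKim/algorithms | neetCode150/GoogleSpring23HF/ LC2510CheckifThereisaPathWithEqualNumberof0sand1s.py | hasPathWithEqualZeroesAndOnes
-- ===== SOURCE A (Python) =====
-- def hasPathWithEqualZeroesAndOnes(grid):
--     m, n = len(grid), len(grid[0])
--     stack = [(0, 0, 0, 0)]  # (x, y, n_ones, n_zeros)
--     visited = set()  # (x, y, n_ones - n_zeros)
--
--     while stack:
--         x, y, n_ones, n_zeros = stack.pop()
--         diff = n_ones - n_zeros
--
--         if (x, y, diff) not in visited:
--             visited.add((x, y, diff))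
--
--             if grid[x][y] == 1:
--                 n_ones += 1
--             else:
--                 n_zeros += 1
--
--             # Check if we reached the bottom-right corner
--             if x == m - 1 and y == n - 1:
--                 if n_ones == n_zeros:
--                     return True
--
--             # Explore neighbors (right and down)
--             for r in [(0, 1), (1, 0)]:
--                 x_bar, y_bar = x + r[0], y + r[1]
--                 if 0 <= x_bar < m and 0 <= y_bar < n:
--                     stack.append((x_bar, y_bar, n_ones, n_zeros))
--
--     return False
-- ===== SOURCE B (Python) =====
-- def hasPathWithEqualZeroesAndOnes(grid):
--     # Forward tabular DP: for each cell, the set of (ones - zeros) diffs over all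
--     # monotone paths ending at that cell (inclusive of the cell's value).
--     n = len(grid[0])
--     up = None
--     for vals in grid:
--         new = []
--         for j in range(n):
--             s = 1 if vals[j] == 1 else -1
--             if up is None and j == 0:
--                 cell = {s}
--             else:
--                 src = set()
--                 if j > 0:
--                     src |= new[j - 1]
--                 if up is not None:
--                     src |= up[j]
--                 cell = {d + s for d in src}
--             new.append(cell)
--         up = new
--     return 0 in up[n - 1]
-- ===== Notes on version B (the rewrite author's own statement) =====
-- stated objective: alternative
-- what changed: Replaces A's stack-driven DFS with a visited set of (cell, ones-minus-zeros) keys by a forward row-by-row tabular DP that stores, for each cell, the set of reachable ones-minus-zeros differences and checks whether 0 is in the bottom-right cell's set.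
-- outside the precondition, e.g. on hasPathWithEqualZeroesAndOnes([[1, 1], [0], [1, 0]]): A returns True, B raises IndexError
import Mathlib
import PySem

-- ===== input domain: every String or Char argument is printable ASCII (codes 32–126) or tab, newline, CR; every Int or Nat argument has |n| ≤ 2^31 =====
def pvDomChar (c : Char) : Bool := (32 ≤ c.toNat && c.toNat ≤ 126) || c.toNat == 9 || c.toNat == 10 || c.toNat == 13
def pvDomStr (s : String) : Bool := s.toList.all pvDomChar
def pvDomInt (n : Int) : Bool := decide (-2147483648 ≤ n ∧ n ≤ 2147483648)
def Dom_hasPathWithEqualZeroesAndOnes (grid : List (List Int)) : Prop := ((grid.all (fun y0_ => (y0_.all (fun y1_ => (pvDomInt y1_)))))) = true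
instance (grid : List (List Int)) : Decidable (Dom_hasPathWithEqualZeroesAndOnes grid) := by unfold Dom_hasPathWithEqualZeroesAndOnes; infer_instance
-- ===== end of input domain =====

-- B replaces A's stack-driven DFS (visited set keyed on (cell, ones-zeros diff)) by a forward
-- row-by-row tabular DP storing, per cell, the set of reachable ones-minus-zeros differences;
-- objective: alternative (same asymptotic cost, no stack/visited bookkeeping).

-- ===== PORT A =====
-- the while-loop of A; fuel only makes the recursion total (proved sufficient below),
-- stack head = top of Python's stack (append/pop at the end)
def hasPathLoopA (grid : List (List Int)) (m n : Int) :
    Nat → List (Int × Int × Int × Int) → PySem.Set (Int × Int × Int) → Bool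
  | 0, _, _ => false
  | _ + 1, [], _ => false
  | fuel + 1, (x, y, o, z) :: rest, visited =>
    let diff := o - z
    if PySem.Set.contains visited (x, y, diff) then
      hasPathLoopA grid m n fuel rest visited
    else
      let visited' := PySem.Set.add visited (x, y, diff)
      let o' := if PySem.List.pyGetD (PySem.List.pyGetD grid x []) y 0 == 1 then o + 1 else o
      let z' := if PySem.List.pyGetD (PySem.List.pyGetD grid x []) y 0 == 1 then z else z + 1
      if x == m - 1 && y == n - 1 && o' == z' then true
      else
        -- append (x, y+1) then (x+1, y); popping from the end = head of our list
        let s1 := if 0 ≤ x ∧ x < m ∧ 0 ≤ y + 1 ∧ y + 1 < n then (x, y + 1, o', z') :: rest else rest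
        let s2 := if 0 ≤ x + 1 ∧ x + 1 < m ∧ 0 ≤ y ∧ y < n then (x + 1, y, o', z') :: s1 else s1
        hasPathLoopA grid m n fuel s2 visited'

def hasPathWithEqualZeroesAndOnes (grid : List (List Int)) : Bool :=
  let M : Nat := grid.length
  let N : Nat := (PySem.List.pyGetD grid 0 []).length
  hasPathLoopA grid (M : Int) (N : Int)
    (2 * (M * (N * (2 * (M + N) + 1))) + 2) [(0, 0, 0, 0)] PySem.Set.empty

-- ===== PORT B =====
-- one row of the DP: new[j] = set of diffs of paths ending at cell j of this row (inclusive)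
def hasPathRowB (n : Int) (up : Option (List (PySem.Set Int))) (vals : List Int) :
    List (PySem.Set Int) :=
  (PySem.List.pyRange 0 n 1).foldl (fun new j =>
    let s : Int := if PySem.List.pyGetD vals j 0 == 1 then 1 else -1
    let cell : PySem.Set Int :=
      if up.isNone ∧ j = 0 then PySem.Set.ofList [s]
      else
        let src : PySem.Set Int := PySem.Set.empty
        let src := if 0 < j then PySem.Set.union src (PySem.List.pyGetD new (j - 1) PySem.Set.empty) else src
        let src := match up with
          | some u => PySem.Set.union src (PySem.List.pyGetD u j PySem.Set.empty)
          | none => src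
        PySem.Set.ofList (src.map (fun d => d + s))
    new ++ [cell]) []

def hasPathWithEqualZeroesAndOnes_alt (grid : List (List Int)) : Bool :=
  let n : Int := ((PySem.List.pyGetD grid 0 []).length : Int)
  let up := grid.foldl (fun up vals => some (hasPathRowB n up vals))
    (none : Option (List (PySem.Set Int)))
  match up with
  | none => false   -- unreachable under Pre_ (Python raises on an empty grid)
  | some u => PySem.Set.contains (PySem.List.pyGetD u (n - 1) PySem.Set.empty) 0

-- ===== PRECONDITION & SPEC =====
-- Pre_ excludes the empty grid and jagged grids having a row shorter than the first row: on
-- essentially all of those A raises IndexError (as does B), and on the rare jagged grids where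
-- the DFS finds an equal path before touching a short row A returns True while B's full-table
-- DP raises IndexError there.
def Pre_hasPathWithEqualZeroesAndOnes (grid : List (List Int)) : Prop :=
  grid ≠ [] ∧ 0 < grid.headI.length ∧ ∀ r ∈ grid, grid.headI.length ≤ r.length
instance (grid : List (List Int)) : Decidable (Pre_hasPathWithEqualZeroesAndOnes grid) := by
  unfold Pre_hasPathWithEqualZeroesAndOnes; infer_instance

def pvWitness_hasPathWithEqualZeroesAndOnes : List (List Int) := [[1, 0], [0, 1]]

def Spec_hasPathWithEqualZeroesAndOnes (grid : List (List Int)) (out : Bool) : Prop := out = hasPathWithEqualZeroesAndOnes_alt grid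
instance (grid : List (List Int)) (out : Bool) : Decidable (Spec_hasPathWithEqualZeroesAndOnes grid out) := by unfold Spec_hasPathWithEqualZeroesAndOnes; infer_instance

-- ===== CLAIM (what is proved, stated in full; the proofs are below) =====
def Claim_equal_hasPathWithEqualZeroesAndOnes : Prop := ∀ (grid : List (List Int)), Dom_hasPathWithEqualZeroesAndOnes grid → Pre_hasPathWithEqualZeroesAndOnes grid → Spec_hasPathWithEqualZeroesAndOnes grid (hasPathWithEqualZeroesAndOnes grid)

-- ===== LEMMAS AND PROOFS =====

-- dimensions and cell access shared by the correctness arguments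
def pvM (grid : List (List Int)) : Int := grid.length
def pvN (grid : List (List Int)) : Int := ((PySem.List.pyGetD grid 0 []).length : Int)
def pvCellv (grid : List (List Int)) (x y : Int) : Int :=
  PySem.List.pyGetD (PySem.List.pyGetD grid x []) y 0
def pvSt (grid : List (List Int)) (x y : Int) : Int :=
  if pvCellv grid x y == 1 then 1 else -1

-- key-graph reachability: RK grid x y d ⟺ some monotone path from (0,0) reaches cell (x,y)
-- with ones-minus-zeros difference d over the cells STRICTLY BEFORE (x,y)
inductive RK (grid : List (List Int)) : Int → Int → Int → Prop
  | start : RK grid 0 0 0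
  | down {x y d : Int} : RK grid x y d → x + 1 < pvM grid →
      RK grid (x + 1) y (d + pvSt grid x y)
  | right {x y d : Int} : RK grid x y d → y + 1 < pvN grid →
      RK grid x (y + 1) (d + pvSt grid x y)

def SuccessP (grid : List (List Int)) : Prop :=
  ∃ d, RK grid (pvM grid - 1) (pvN grid - 1) d ∧ d + pvSt grid (pvM grid - 1) (pvN grid - 1) = 0


def pvKey (e : Int × Int × Int × Int) : Int × Int × Int := (e.1, e.2.1, e.2.2.1 - e.2.2.2)

-- |visited| is bounded by the size of the finite key space
def pvBound (grid : List (List Int)) : Nat :=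
  grid.length * ((PySem.List.pyGetD grid 0 []).length *
    (2 * (grid.length + (PySem.List.pyGetD grid 0 []).length) + 1))

def pvInKS (grid : List (List Int)) (k : Int × Int × Int) : Prop :=
  0 ≤ k.1 ∧ k.1 < pvM grid ∧ 0 ≤ k.2.1 ∧ k.2.1 < pvN grid ∧
    -(pvM grid + pvN grid) ≤ k.2.2 ∧ k.2.2 ≤ pvM grid + pvN grid

theorem visited_len_le (grid : List (List Int)) (visited : List (Int × Int × Int))
    (hnd : visited.Nodup) (hb : ∀ k ∈ visited, pvInKS grid k) :
    visited.length ≤ pvBound grid := by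
  classical
  have h1 : visited.toFinset ⊆
      Finset.Icc 0 (pvM grid - 1) ×ˢ Finset.Icc 0 (pvN grid - 1) ×ˢ
        Finset.Icc (-(pvM grid + pvN grid)) (pvM grid + pvN grid) := by
    intro k hk
    have := hb k (List.mem_toFinset.mp hk)
    simp only [pvInKS] at this
    simp [Finset.mem_product, Finset.mem_Icc]
    omega
  calc visited.length = visited.toFinset.card := (List.toFinset_card_of_nodup hnd).symm
    _ ≤ _ := Finset.card_le_card h1
    _ ≤ pvBound grid := by
        have e1 : (pvM grid - 1 + 1 - 0).toNat = grid.length := by simp [pvM]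
        have e2 : (pvN grid - 1 + 1 - 0).toNat = (PySem.List.pyGetD grid 0 []).length := by
          simp [pvN]
        have e3 : (pvM grid + pvN grid + 1 - -(pvM grid + pvN grid)).toNat
            = 2 * (grid.length + (PySem.List.pyGetD grid 0 []).length) + 1 := by
          simp only [pvM, pvN]; omega
        rw [Finset.card_product, Finset.card_product, Int.card_Icc, Int.card_Icc, Int.card_Icc,
          e1, e2, e3]
        exact Nat.le_refl _

def pvSucc (grid : List (List Int)) (k k' : Int × Int × Int) : Prop :=
  (k.1 + 1 < pvM grid ∧ k' = (k.1 + 1, k.2.1, k.2.2 + pvSt grid k.1 k.2.1)) ∨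
  (k.2.1 + 1 < pvN grid ∧ k' = (k.1, k.2.1 + 1, k.2.2 + pvSt grid k.1 k.2.1))

theorem RK_bounds {grid : List (List Int)} (hm : 1 ≤ pvM grid) (hn : 1 ≤ pvN grid)
    {x y d : Int} (h : RK grid x y d) :
    0 ≤ x ∧ x < pvM grid ∧ 0 ≤ y ∧ y < pvN grid := by
  induction h with
  | start => omega
  | down h hlt ih => omega
  | right h hlt ih => omega


theorem RK_inv {grid : List (List Int)} (hm : 1 ≤ pvM grid) (hn : 1 ≤ pvN grid)
    {x y d : Int} (h : RK grid x y d) :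
    (x = 0 ∧ y = 0 ∧ d = 0) ∨
    (1 ≤ x ∧ ∃ p, RK grid (x - 1) y p ∧ d = p + pvSt grid (x - 1) y) ∨
    (1 ≤ y ∧ ∃ p, RK grid x (y - 1) p ∧ d = p + pvSt grid x (y - 1)) := by
  cases h with
  | start => exact Or.inl ⟨rfl, rfl, rfl⟩
  | @down x' y' d' h hlt =>
      have hb := RK_bounds hm hn h
      refine Or.inr (Or.inl ⟨by omega, d', ?_, ?_⟩)
      · simpa only [add_sub_cancel_right] using h
      · simp only [add_sub_cancel_right]
  | @right x' y' d' h hlt =>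
      have hb := RK_bounds hm hn h
      refine Or.inr (Or.inr ⟨by omega, d', ?_, ?_⟩)
      · simpa only [add_sub_cancel_right] using h
      · simp only [add_sub_cancel_right]

theorem RK_zero_inv {grid : List (List Int)} (hm : 1 ≤ pvM grid) (hn : 1 ≤ pvN grid)
    {d : Int} (h : RK grid 0 0 d) : d = 0 := by
  rcases RK_inv hm hn h with ⟨_, _, h0⟩ | ⟨h1, _⟩ | ⟨h1, _⟩ <;> omega

-- A's loop invariant
def pvInv (grid : List (List Int)) (stack : List (Int × Int × Int × Int))
    (visited : List (Int × Int × Int)) : Prop :=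
  (∀ e ∈ stack, 0 ≤ e.1 ∧ e.1 < pvM grid ∧ 0 ≤ e.2.1 ∧ e.2.1 < pvN grid ∧
      0 ≤ e.2.2.1 ∧ 0 ≤ e.2.2.2 ∧ e.2.2.1 + e.2.2.2 = e.1 + e.2.1 ∧
      RK grid e.1 e.2.1 (e.2.2.1 - e.2.2.2)) ∧
  (∀ k ∈ visited, pvInKS grid k ∧ RK grid k.1 k.2.1 k.2.2) ∧
  visited.Nodup ∧
  (∀ k ∈ visited, ∀ k', pvSucc grid k k' → k' ∈ visited ∨ ∃ e ∈ stack, pvKey e = k') ∧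
  (((0 : Int), (0 : Int), (0 : Int)) ∈ visited ∨ ∃ e ∈ stack, pvKey e = (0, 0, 0)) ∧
  (∀ d : Int, ((pvM grid - 1, pvN grid - 1, d) ∈ visited) →
      d + pvSt grid (pvM grid - 1) (pvN grid - 1) ≠ 0)

theorem visited_closed {grid : List (List Int)}
    {visited : List (Int × Int × Int)}
    (h0 : ((0 : Int), (0 : Int), (0 : Int)) ∈ visited)
    (hcl : ∀ k ∈ visited, ∀ k', pvSucc grid k k' → k' ∈ visited) :
    ∀ x y d, RK grid x y d → (x, y, d) ∈ visited := by
  intro x y d h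
  induction h with
  | start => exact h0
  | @down x' y' d' h hlt ih => exact hcl _ ih _ (Or.inl ⟨hlt, rfl⟩)
  | @right x' y' d' h hlt ih => exact hcl _ ih _ (Or.inr ⟨hlt, rfl⟩)

theorem noSuccess_of_closed {grid : List (List Int)}
    {visited : List (Int × Int × Int)}
    (h0 : ((0 : Int), (0 : Int), (0 : Int)) ∈ visited)
    (hcl : ∀ k ∈ visited, ∀ k', pvSucc grid k k' → k' ∈ visited)
    (hns : ∀ d : Int, ((pvM grid - 1, pvN grid - 1, d) ∈ visited) →
      d + pvSt grid (pvM grid - 1) (pvN grid - 1) ≠ 0) :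
    ¬ SuccessP grid := by
  rintro ⟨d, hrk, hz⟩
  exact hns d (visited_closed h0 hcl _ _ _ hrk) hz

theorem loopA_iff (grid : List (List Int)) (hm : 1 ≤ pvM grid) (hn : 1 ≤ pvN grid) :
    ∀ (fuel : Nat) (stack : List (Int × Int × Int × Int)) (visited : List (Int × Int × Int)),
      pvInv grid stack visited →
      2 * (pvBound grid - visited.length) + stack.length ≤ fuel →
      (hasPathLoopA grid (pvM grid) (pvN grid) fuel stack visited = true ↔ SuccessP grid) := by
  intro fuel
  induction fuel with
  | zero =>
    intro stack visited hInv hfuel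
    obtain ⟨hS, hV, hnd, hcl, hstart, hns⟩ := hInv
    have hstk : stack = [] := by
      cases stack with
      | nil => rfl
      | cons e t => simp at hfuel
    subst hstk
    have h0 : ((0 : Int), (0 : Int), (0 : Int)) ∈ visited := by
      rcases hstart with h | ⟨e, he, _⟩
      · exact h
      · simp at he
    simp only [hasPathLoopA, Bool.false_eq_true, false_iff]
    exact noSuccess_of_closed h0
      (fun k hk k' hsucc => (hcl k hk k' hsucc).resolve_right (by rintro ⟨e, he, _⟩; simp at he))
      hns
  | succ fuel ih =>
    intro stack visited hInv hfuel
    obtain ⟨hS, hV, hnd, hcl, hstart, hns⟩ := hInv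
    cases stack with
    | nil =>
      have h0 : ((0 : Int), (0 : Int), (0 : Int)) ∈ visited := by
        rcases hstart with h | ⟨e, he, _⟩
        · exact h
        · simp at he
      simp only [hasPathLoopA, Bool.false_eq_true, false_iff]
      exact noSuccess_of_closed h0
        (fun k hk k' hsucc => (hcl k hk k' hsucc).resolve_right (by rintro ⟨e, he, _⟩; simp at he))
        hns
    | cons hd rest =>
      obtain ⟨x, y, o, z⟩ := hd
      obtain ⟨hx0, hxm, hy0, hyn, ho0, hz0, hsum, hrk⟩ := hS (x, y, o, z) List.mem_cons_self
      dsimp only at hx0 hxm hy0 hyn ho0 hz0 hsum hrk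
      simp only [hasPathLoopA]
      by_cases hv : ((x, y, o - z) ∈ visited)
      · rw [if_pos (by simpa [PySem.Set.contains_iff] using hv)]
        refine ih rest visited ⟨fun e he => hS e (List.mem_cons_of_mem _ he), hV, hnd, ?_, ?_, hns⟩
          (by simp at hfuel ⊢; omega)
        · intro k hk k' hsucc
          rcases hcl k hk k' hsucc with h | ⟨e, he, hkey⟩
          · exact Or.inl h
          · rcases List.mem_cons.mp he with rfl | he'
            · exact Or.inl (by rw [← hkey]; exact hv)
            · exact Or.inr ⟨e, he', hkey⟩
        · rcases hstart with h | ⟨e, he, hkey⟩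
          · exact Or.inl h
          · rcases List.mem_cons.mp he with rfl | he'
            · exact Or.inl (by rw [← hkey]; exact hv)
            · exact Or.inr ⟨e, he', hkey⟩
      · rw [if_neg (by simpa [PySem.Set.contains_iff] using hv)]
        have hadd : PySem.Set.add visited (x, y, o - z) = visited ++ [(x, y, o - z)] := by
          unfold PySem.Set.add
          rw [if_neg (by simpa [PySem.Set.contains_iff] using hv)]
        set O : Int := if PySem.List.pyGetD (PySem.List.pyGetD grid x []) y 0 == 1 then o + 1 else o with hO
        set Z : Int := if PySem.List.pyGetD (PySem.List.pyGetD grid x []) y 0 == 1 then z else z + 1 with hZ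
        have hOZ : 0 ≤ O ∧ 0 ≤ Z ∧ O + Z = x + y + 1 ∧ O - Z = (o - z) + pvSt grid x y := by
          have hst : pvSt grid x y
              = if PySem.List.pyGetD (PySem.List.pyGetD grid x []) y 0 == 1 then 1 else -1 := rfl
          by_cases hc : (PySem.List.pyGetD (PySem.List.pyGetD grid x []) y 0 == 1) = true
          · rw [hO, hZ, hst]; simp [hc]; omega
          · rw [hO, hZ, hst]; simp [hc]; omega
        by_cases hcor : (x == pvM grid - 1 && y == pvN grid - 1 && O == Z) = true
        · rw [if_pos hcor]
          simp only [true_iff]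
          simp only [Bool.and_eq_true, beq_iff_eq] at hcor
          obtain ⟨⟨hxc, hyc⟩, hoz⟩ := hcor
          refine ⟨o - z, by rw [← hxc, ← hyc]; exact hrk, by rw [← hxc, ← hyc]; omega⟩
        · rw [if_neg hcor]
          rw [hadd]
          simp only [Bool.and_eq_true, beq_iff_eq, not_and] at hcor
          -- the two conditional pushes
          set c1 : Prop := 0 ≤ x ∧ x < pvM grid ∧ 0 ≤ y + 1 ∧ y + 1 < pvN grid with hc1
          set c2 : Prop := 0 ≤ x + 1 ∧ x + 1 < pvM grid ∧ 0 ≤ y ∧ y < pvN grid with hc2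
          set s1 : List (Int × Int × Int × Int) :=
            if c1 then (x, y + 1, O, Z) :: rest else rest with hs1
          set s2 : List (Int × Int × Int × Int) :=
            if c2 then (x + 1, y, O, Z) :: s1 else s1 with hs2
          have mem_s2 : ∀ e, e ∈ s2 ↔
              (c2 ∧ e = (x + 1, y, O, Z)) ∨ (c1 ∧ e = (x, y + 1, O, Z)) ∨ e ∈ rest := by
            intro e
            rw [hs2, hs1]
            split_ifs with h2 h1 h1 <;> simp [h1, h2]
          have len_s2 : s2.length ≤ rest.length + 2 := by
            rw [hs2, hs1]; split_ifs <;> simp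
          -- invariant for the recursive call
          have hV' : ∀ k ∈ visited ++ [(x, y, o - z)], pvInKS grid k ∧ RK grid k.1 k.2.1 k.2.2 := by
            intro k hk
            rcases List.mem_append.mp hk with hk | hk
            · exact hV k hk
            · simp at hk; subst hk
              have hk' : 0 ≤ x ∧ x < pvM grid ∧ 0 ≤ y ∧ y < pvN grid ∧
                  -(pvM grid + pvN grid) ≤ o - z ∧ o - z ≤ pvM grid + pvN grid := by omega
              exact ⟨hk', hrk⟩
          have hnd' : (visited ++ [(x, y, o - z)]).Nodup :=
            hnd.append (List.nodup_singleton _)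
              (by intro a ha hb; simp at hb; subst hb; exact hv ha)
          have hlen' : (visited ++ [(x, y, o - z)]).length ≤ pvBound grid :=
            visited_len_le grid _ hnd' (fun k hk => (hV' k hk).1)
          refine ih s2 (visited ++ [(x, y, o - z)]) ⟨?_, hV', hnd', ?_, ?_, ?_⟩ ?_
          · -- stack invariant
            intro e he
            rcases (mem_s2 e).mp he with ⟨hg, rfl⟩ | ⟨hg, rfl⟩ | he'
            · rw [hc2] at hg
              obtain ⟨hO0, hZ0', hOZs, hOZd⟩ := hOZ
              have hb : 0 ≤ x + 1 ∧ x + 1 < pvM grid ∧ 0 ≤ y ∧ y < pvN grid ∧ 0 ≤ O ∧ 0 ≤ Z ∧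
                  O + Z = x + 1 + y ∧ RK grid (x + 1) y (O - Z) :=
                ⟨by omega, by omega, by omega, by omega, by omega, by omega, by omega,
                  by rw [hOZd]; exact RK.down hrk (by omega)⟩
              exact hb
            · rw [hc1] at hg
              obtain ⟨hO0, hZ0', hOZs, hOZd⟩ := hOZ
              have hb : 0 ≤ x ∧ x < pvM grid ∧ 0 ≤ y + 1 ∧ y + 1 < pvN grid ∧ 0 ≤ O ∧ 0 ≤ Z ∧
                  O + Z = x + (y + 1) ∧ RK grid x (y + 1) (O - Z) :=
                ⟨by omega, by omega, by omega, by omega, by omega, by omega, by omega,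
                  by rw [hOZd]; exact RK.right hrk (by omega)⟩
              exact hb
            · exact hS e (List.mem_cons_of_mem _ he')
          · -- closure
            intro k hk k' hsucc
            rcases List.mem_append.mp hk with hk | hk
            · rcases hcl k hk k' hsucc with h | ⟨e, he, hkey⟩
              · exact Or.inl (List.mem_append.mpr (Or.inl h))
              · rcases List.mem_cons.mp he with rfl | he'
                · exact Or.inl (by rw [← hkey]; simp [pvKey])
                · exact Or.inr ⟨e, (mem_s2 e).mpr (Or.inr (Or.inr he')), hkey⟩
            · simp at hk; subst hk
              rcases hsucc with ⟨hlt, rfl⟩ | ⟨hlt, rfl⟩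
              · have hlt' : x + 1 < pvM grid := hlt
                refine Or.inr ⟨(x + 1, y, O, Z), (mem_s2 _).mpr (Or.inl ⟨by rw [hc2]; omega, rfl⟩), ?_⟩
                simp only [pvKey]
                rw [hOZ.2.2.2]
              · have hlt' : y + 1 < pvN grid := hlt
                refine Or.inr ⟨(x, y + 1, O, Z), (mem_s2 _).mpr (Or.inr (Or.inl ⟨by rw [hc1]; omega, rfl⟩)), ?_⟩
                simp only [pvKey]
                rw [hOZ.2.2.2]
          · -- start coverage
            rcases hstart with h | ⟨e, he, hkey⟩
            · exact Or.inl (List.mem_append.mpr (Or.inl h))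
            · rcases List.mem_cons.mp he with rfl | he'
              · exact Or.inl (by rw [← hkey]; simp [pvKey])
              · exact Or.inr ⟨e, (mem_s2 e).mpr (Or.inr (Or.inr he')), hkey⟩
          · -- no visited success key
            intro d hd hzero
            rcases List.mem_append.mp hd with hd | hd
            · exact hns d hd hzero
            · simp at hd
              obtain ⟨hxc, hyc, hdc⟩ := hd
              have hOne : O ≠ Z := hcor ⟨hxc.symm, hyc.symm⟩
              have := hOZ.2.2.2
              rw [hxc, hyc] at hzero
              omega
          · -- fuel
            have : (visited ++ [(x, y, o - z)]).length = visited.length + 1 := by simp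
            simp only [this] at hlen' ⊢
            simp only [List.length_cons] at hfuel
            omega

-- ===== B-side: the DP table computes exactly the reachable diffs =====

def pvRowStep (n : Int) (up : Option (List (PySem.Set Int))) (vals : List Int) :
    List (PySem.Set Int) → Int → List (PySem.Set Int) := fun new j =>
  let s : Int := if PySem.List.pyGetD vals j 0 == 1 then 1 else -1
  let cell : PySem.Set Int :=
    if up.isNone ∧ j = 0 then PySem.Set.ofList [s]
    else
      let src : PySem.Set Int := PySem.Set.empty
      let src := if 0 < j then PySem.Set.union src (PySem.List.pyGetD new (j - 1) PySem.Set.empty) else src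
      let src := match up with
        | some u => PySem.Set.union src (PySem.List.pyGetD u j PySem.Set.empty)
        | none => src
      PySem.Set.ofList (src.map (fun d => d + s))
  new ++ [cell]

theorem hasPathRowB_eq (n : Int) (up : Option (List (PySem.Set Int))) (vals : List Int) :
    hasPathRowB n up vals = (PySem.List.pyRange 0 n 1).foldl (pvRowStep n up vals) [] := rfl

def pvChar (grid : List (List Int)) (i : Nat) (L : List (PySem.Set Int)) : Prop :=
  L.length = (PySem.List.pyGetD grid 0 []).length ∧
  ∀ j : Nat, j < (PySem.List.pyGetD grid 0 []).length → ∀ d : Int,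
    (d ∈ L.getD j PySem.Set.empty ↔
      ∃ p, RK grid (i : Int) (j : Int) p ∧ d = p + pvSt grid (i : Int) (j : Int))

theorem rowB_fold (grid : List (List Int)) (hm : 1 ≤ pvM grid) (hn : 1 ≤ pvN grid)
    (i : Nat) (hi : i < grid.length)
    (up : Option (List (PySem.Set Int)))
    (hup : (i = 0 ∧ up = none) ∨ (1 ≤ i ∧ ∃ U, up = some U ∧ pvChar grid (i - 1) U)) :
    ∀ (t k : Nat) (acc : List (PySem.Set Int)),
      (PySem.List.pyGetD grid 0 []).length = k + t → acc.length = k →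
      (∀ j : Nat, j < k → ∀ d : Int,
        (d ∈ acc.getD j PySem.Set.empty ↔
          ∃ p, RK grid (i : Int) (j : Int) p ∧ d = p + pvSt grid (i : Int) (j : Int))) →
      pvChar grid i
        ((PySem.List.pyRange (k : Int) (pvN grid) 1).foldl
          (pvRowStep (pvN grid) up (PySem.List.pyGetD grid (i : Int) [])) acc) := by
  intro t
  induction t with
  | zero =>
    intro k acc ht hlen hchar
    have hNk : pvN grid = (k : Int) := by simp only [pvN]; omega
    rw [hNk, PySem.List.pyRange_one_eq_nil (le_refl _)]
    simp only [List.foldl_nil]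
    exact ⟨by omega, fun j hj d => hchar j (by omega) d⟩
  | succ t ih =>
    intro k acc ht hlen hchar
    have hMe : pvM grid = (grid.length : Int) := rfl
    have hNe : pvN grid = ((PySem.List.pyGetD grid 0 []).length : Int) := rfl
    have hkN : (k : Int) < pvN grid := by simp only [pvN]; omega
    rw [PySem.List.pyRange_one_cons hkN]
    simp only [List.foldl_cons]
    have hs : (if PySem.List.pyGetD (PySem.List.pyGetD grid (i : Int) []) (k : Int) 0 == 1
        then (1 : Int) else -1) = pvSt grid (i : Int) (k : Int) := rfl
    have hlen' : (pvRowStep (pvN grid) up (PySem.List.pyGetD grid (i : Int) []) acc (k : Int)).length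
        = k + 1 := by
      simp [pvRowStep, hlen]
    have hcell : ∀ d : Int,
        d ∈ (pvRowStep (pvN grid) up (PySem.List.pyGetD grid (i : Int) []) acc (k : Int)).getD k
            PySem.Set.empty ↔
          ∃ p, RK grid (i : Int) (k : Int) p ∧ d = p + pvSt grid (i : Int) (k : Int) := by
      intro d
      simp only [pvRowStep]
      rw [List.getD_append_right acc _ _ k (by omega), hlen, Nat.sub_self, List.getD_cons_zero]
      rw [hs]
      rcases hup with ⟨hi0, rfl⟩ | ⟨hi1, U, rfl, hcU⟩
      · -- first row: up = none, i = 0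
        subst hi0
        by_cases hk0 : (k : Int) = 0
        · rw [if_pos ⟨rfl, hk0⟩]
          have hk0' : k = 0 := by omega
          subst hk0'
          simp only [PySem.Set.mem_ofList, List.mem_singleton, Nat.cast_zero]
          constructor
          · rintro rfl
            exact ⟨0, RK.start, by omega⟩
          · rintro ⟨p, hp, rfl⟩
            have : p = 0 := RK_zero_inv hm hn hp
            omega
        · rw [if_neg (by simp; omega)]
          have h0k : 0 < (k : Int) := by omega
          rw [if_pos h0k]
          have hk1 : ((k : Int) - 1) = ((k - 1 : Nat) : Int) := by omega
          rw [hk1, PySem.List.pyGetD_natCast]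
          simp only [PySem.Set.mem_ofList, List.mem_map, PySem.Set.mem_union,
            PySem.Set.empty, List.not_mem_nil, false_or]
          constructor
          · rintro ⟨p, hp, rfl⟩
            obtain ⟨q, hq, rfl⟩ := (hchar (k - 1) (by omega) p).mp hp
            refine ⟨q + pvSt grid ((0 : Nat) : Int) ((k - 1 : Nat) : Int), ?_, rfl⟩
            have hkk : ((k - 1 : Nat) : Int) + 1 = (k : Int) := by omega
            rw [← hkk]
            exact RK.right hq (by omega)
          · rintro ⟨p, hp, rfl⟩
            refine ⟨p, ?_, rfl⟩
            rcases RK_inv hm hn hp with ⟨_, hkz, rfl⟩ | ⟨h1, q, hq, rfl⟩ | ⟨h1, q, hq, rfl⟩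
            · omega
            · simp at h1
            · apply (hchar (k - 1) (by omega) _).mpr
              have hkk : ((k : Int) - 1) = ((k - 1 : Nat) : Int) := by omega
              rw [hkk] at hq ⊢
              exact ⟨q, hq, rfl⟩
      · -- later row: up = some U, i ≥ 1
        rw [if_neg (by simp)]
        have hmem : ∀ p : Int,
            (p ∈ PySem.Set.union
              (if 0 < (k : Int) then
                PySem.Set.union PySem.Set.empty (PySem.List.pyGetD acc ((k : Int) - 1) PySem.Set.empty)
               else PySem.Set.empty)
              (PySem.List.pyGetD U (k : Int) PySem.Set.empty)) ↔
            ((1 ≤ k ∧ p ∈ acc.getD (k - 1) PySem.Set.empty) ∨ p ∈ U.getD k PySem.Set.empty) := by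
          intro p
          by_cases h0k : 0 < (k : Int)
          · rw [if_pos h0k]
            have hk1 : ((k : Int) - 1) = ((k - 1 : Nat) : Int) := by omega
            rw [hk1]
            simp only [PySem.Set.mem_union, PySem.Set.empty, List.not_mem_nil, false_or,
              PySem.List.pyGetD_natCast]
            constructor
            · rintro (h | h)
              · exact Or.inl ⟨by omega, h⟩
              · exact Or.inr h
            · rintro (⟨_, h⟩ | h)
              · exact Or.inl h
              · exact Or.inr h
          · rw [if_neg h0k]
            simp only [PySem.Set.mem_union, PySem.Set.empty, List.not_mem_nil, false_or,
              PySem.List.pyGetD_natCast]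
            constructor
            · exact fun h => Or.inr h
            · rintro (⟨h1, _⟩ | h)
              · omega
              · exact h
        simp only [PySem.Set.mem_ofList, List.mem_map]
        constructor
        · rintro ⟨p, hp, rfl⟩
          rcases (hmem p).mp hp with ⟨hk1, hpL⟩ | hpU
          · obtain ⟨q, hq, rfl⟩ := (hchar (k - 1) (by omega) p).mp hpL
            refine ⟨q + pvSt grid (i : Int) ((k - 1 : Nat) : Int), ?_, rfl⟩
            have hkk : ((k - 1 : Nat) : Int) + 1 = (k : Int) := by omega
            rw [← hkk]
            exact RK.right hq (by omega)
          · obtain ⟨q, hq, rfl⟩ := (hcU.2 k (by omega) p).mp hpU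
            refine ⟨q + pvSt grid ((i - 1 : Nat) : Int) (k : Int), ?_, rfl⟩
            have hii : ((i - 1 : Nat) : Int) + 1 = (i : Int) := by omega
            rw [← hii]
            exact RK.down hq (by omega)
        · rintro ⟨p, hp, rfl⟩
          refine ⟨p, ?_, rfl⟩
          rcases RK_inv hm hn hp with ⟨hiz, _, rfl⟩ | ⟨h1, q, hq, rfl⟩ | ⟨h1, q, hq, rfl⟩
          · omega
          · refine (hmem _).mpr (Or.inr ?_)
            apply (hcU.2 k (by omega) _).mpr
            have hii : ((i : Int) - 1) = ((i - 1 : Nat) : Int) := by omega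
            rw [hii] at hq ⊢
            exact ⟨q, hq, rfl⟩
          · refine (hmem _).mpr (Or.inl ⟨by omega, ?_⟩)
            apply (hchar (k - 1) (by omega) _).mpr
            have hkk : ((k : Int) - 1) = ((k - 1 : Nat) : Int) := by omega
            rw [hkk] at hq ⊢
            exact ⟨q, hq, rfl⟩
    -- recurse on the remaining columns
    have hcast : ((k : Int) + 1) = ((k + 1 : Nat) : Int) := by omega
    rw [hcast]
    refine ih (k + 1) _ (by omega) hlen' ?_
    intro j hj d
    by_cases hjk : j < k
    · rw [show (pvRowStep (pvN grid) up (PySem.List.pyGetD grid (i : Int) []) acc (k : Int)).getD j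
          PySem.Set.empty = acc.getD j PySem.Set.empty by
        simp only [pvRowStep]
        rw [List.getD_append acc _ _ j (by omega)]]
      exact hchar j hjk d
    · have hjk' : j = k := by omega
      subst hjk'
      exact hcell d

theorem rowB_char (grid : List (List Int)) (hm : 1 ≤ pvM grid) (hn : 1 ≤ pvN grid)
    (i : Nat) (hi : i < grid.length) (up : Option (List (PySem.Set Int)))
    (hup : (i = 0 ∧ up = none) ∨ (1 ≤ i ∧ ∃ U, up = some U ∧ pvChar grid (i - 1) U)) :
    pvChar grid i (hasPathRowB (pvN grid) up (PySem.List.pyGetD grid (i : Int) [])) := by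
  rw [hasPathRowB_eq]
  exact rowB_fold grid hm hn i hi up hup (PySem.List.pyGetD grid 0 []).length 0 []
    (by omega) rfl (by intro j hj d; omega)

theorem foldB_take (grid : List (List Int)) (hm : 1 ≤ pvM grid) (hn : 1 ≤ pvN grid) :
    ∀ i : Nat, i ≤ grid.length →
      (i = 0 ∧ (grid.take i).foldl
          (fun up vals => some (hasPathRowB (pvN grid) up vals))
          (none : Option (List (PySem.Set Int))) = none) ∨
      (1 ≤ i ∧ ∃ U, (grid.take i).foldl
          (fun up vals => some (hasPathRowB (pvN grid) up vals))
          (none : Option (List (PySem.Set Int))) = some U ∧ pvChar grid (i - 1) U) := by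
  intro i
  induction i with
  | zero => intro _; exact Or.inl ⟨rfl, by simp⟩
  | succ i ih =>
    intro hle
    have hi : i < grid.length := by omega
    have htake : grid.take (i + 1) = grid.take i ++ [grid[i]] := by
      rw [List.take_add_one, List.getElem?_eq_getElem hi]
      rfl
    have hval : PySem.List.pyGetD grid (i : Int) [] = grid[i] := by
      rw [PySem.List.pyGetD_natCast]
      exact List.getD_eq_getElem grid [] hi
    refine Or.inr ⟨by omega, ?_⟩
    rw [htake, List.foldl_append]
    rcases ih (by omega) with ⟨hi0, hfold⟩ | ⟨h1, U, hfold, hc⟩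
    · subst hi0
      rw [hfold]
      refine ⟨hasPathRowB (pvN grid) none grid[0], rfl, ?_⟩
      have := rowB_char grid hm hn 0 hi none (Or.inl ⟨rfl, rfl⟩)
      rwa [hval] at this
    · rw [hfold]
      refine ⟨hasPathRowB (pvN grid) (some U) grid[i], rfl, ?_⟩
      have := rowB_char grid hm hn i hi (some U) (Or.inr ⟨h1, U, rfl, hc⟩)
      rwa [hval] at this

theorem altB_iff (grid : List (List Int)) (hm : 1 ≤ pvM grid) (hn : 1 ≤ pvN grid) :
    (hasPathWithEqualZeroesAndOnes_alt grid = true ↔ SuccessP grid) := by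
  have hMe : pvM grid = (grid.length : Int) := rfl
  have hNe : pvN grid = ((PySem.List.pyGetD grid 0 []).length : Int) := rfl
  rcases foldB_take grid hm hn grid.length (le_refl _) with ⟨h0, _⟩ | ⟨h1, U, hU, hc⟩
  · exfalso; rw [hMe] at hm; omega
  · rw [List.take_length] at hU
    have halt : hasPathWithEqualZeroesAndOnes_alt grid =
        (match grid.foldl (fun up vals => some (hasPathRowB (pvN grid) up vals))
            (none : Option (List (PySem.Set Int))) with
          | none => false
          | some u => PySem.Set.contains (PySem.List.pyGetD u (pvN grid - 1) PySem.Set.empty) 0) := rfl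
    rw [halt, hU]
    simp only [PySem.Set.contains_iff]
    have hidx : pvN grid - 1 = (((PySem.List.pyGetD grid 0 []).length - 1 : Nat) : Int) := by
      rw [hNe] at hn ⊢; omega
    rw [hidx, PySem.List.pyGetD_natCast]
    rw [hc.2 ((PySem.List.pyGetD grid 0 []).length - 1) (by rw [hNe] at hn; omega) 0]
    have hMi : ((grid.length - 1 : Nat) : Int) = pvM grid - 1 := by rw [hMe]; omega
    have hNi : (((PySem.List.pyGetD grid 0 []).length - 1 : Nat) : Int) = pvN grid - 1 := by
      rw [hNe] at hn ⊢; omega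
    rw [hMi, hNi]
    constructor
    · rintro ⟨p, hp, h0⟩; exact ⟨p, hp, by omega⟩
    · rintro ⟨p, hp, h0⟩; exact ⟨p, hp, by omega⟩

theorem altA_iff (grid : List (List Int)) (hm : 1 ≤ pvM grid) (hn : 1 ≤ pvN grid) :
    (hasPathWithEqualZeroesAndOnes grid = true ↔ SuccessP grid) := by
  have hA : hasPathWithEqualZeroesAndOnes grid = hasPathLoopA grid (pvM grid) (pvN grid)
      (2 * pvBound grid + 2) [(0, 0, 0, 0)] PySem.Set.empty := rfl
  rw [hA]
  apply loopA_iff grid hm hn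
  · refine ⟨?_, ?_, ?_, ?_, ?_, ?_⟩
    · intro e he
      simp only [List.mem_singleton] at he
      subst he
      have hb : 0 ≤ (0 : Int) ∧ (0 : Int) < pvM grid ∧ 0 ≤ (0 : Int) ∧ (0 : Int) < pvN grid ∧
          0 ≤ (0 : Int) ∧ 0 ≤ (0 : Int) ∧ (0 : Int) + 0 = 0 + 0 ∧ RK grid 0 0 ((0 : Int) - 0) :=
        ⟨le_refl _, by omega, le_refl _, by omega, le_refl _, le_refl _, rfl,
          by simpa using RK.start⟩
      exact hb
    · intro k hk; simp [PySem.Set.empty] at hk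
    · simp [PySem.Set.empty]
    · intro k hk; simp [PySem.Set.empty] at hk
    · exact Or.inr ⟨(0, 0, 0, 0), List.mem_singleton.mpr rfl, by simp [pvKey]⟩
    · intro d hd; simp [PySem.Set.empty] at hd
  · simp [PySem.Set.empty]

theorem hasPathWithEqualZeroesAndOnes_spec : Claim_equal_hasPathWithEqualZeroesAndOnes := by
  intro grid _ hpre
  obtain ⟨hne, hhead, _⟩ := hpre
  have hm : 1 ≤ pvM grid := by
    have h0 : 0 < grid.length := List.length_pos_of_ne_nil hne
    simp only [pvM]; omega
  have hn : 1 ≤ pvN grid := by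
    cases grid with
    | nil => exact absurd rfl hne
    | cons r t =>
      have hr : PySem.List.pyGetD (r :: t) 0 [] = r := by
        simp [PySem.List.pyGetD_zero_cons]
      simp only [pvN, hr]
      simp only [List.headI] at hhead
      omega
  unfold Spec_hasPathWithEqualZeroesAndOnes
  exact Bool.eq_iff_iff.mpr ((altA_iff grid hm hn).trans (altB_iff grid hm hn).symm)
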